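-- pv_equiv track=rewrite | github.com/SelmaniZayd/casino_python | modules/beautify.py | format_suits
-- ===== SOURCE A (Python) =====
-- def format_suits(hand):
--     new_hand=hand.copy()
--     for i in range(0,len(new_hand)):
--         new_hand[i] = new_hand[i].replace('h', '1')
--         new_hand[i] = new_hand[i].replace('d', '2')
--         new_hand[i] = new_hand[i].replace('c', '3')
--         new_hand[i] = new_hand[i].replace('s', '4')
--     return new_hand
-- ===== SOURCE B (Python) =====
-- def format_suits(hand):
--     m = {'h': '1', 'd': '2', 'c': '3', 's': '4'}
--     return [''.join(m.get(ch, ch) for ch in card) for card in hand]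
-- ===== Notes on version B (the rewrite author's own statement) =====
-- stated objective: idiomatic
-- what changed: Replaces the four sequential whole-string .replace scans per card with one character-level pass over each card using a translation dict built once (unmapped characters pass through).
import Mathlib
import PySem

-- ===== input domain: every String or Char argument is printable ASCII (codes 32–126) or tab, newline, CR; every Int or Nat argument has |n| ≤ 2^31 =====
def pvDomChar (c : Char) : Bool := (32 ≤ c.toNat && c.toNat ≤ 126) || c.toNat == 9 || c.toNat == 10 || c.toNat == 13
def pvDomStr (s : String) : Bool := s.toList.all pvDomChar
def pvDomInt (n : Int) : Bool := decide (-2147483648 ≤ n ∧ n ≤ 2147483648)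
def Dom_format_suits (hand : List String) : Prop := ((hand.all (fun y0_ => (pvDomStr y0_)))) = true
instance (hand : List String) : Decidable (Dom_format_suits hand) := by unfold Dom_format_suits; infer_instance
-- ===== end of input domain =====

-- B replaces A's four sequential whole-string .replace scans per card with a single
-- character-level pass using a translation dict built once (objective: idiomatic).

-- ===== PORT A =====
-- A copies the list and overwrites each position i with the 4-fold replace chain of the
-- element at i; since each iteration touches only index i, this is the elementwise map below.
def format_suits (hand : List String) : List String :=
  hand.map (fun card =>
    PySem.Str.replace
      (PySem.Str.replace
        (PySem.Str.replace
          (PySem.Str.replace card "h" "1") "d" "2") "c" "3") "s" "4")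

-- ===== PORT B =====
-- m = {'h':'1','d':'2','c':'3','s':'4'}
def pvSuitDict : PySem.Dict Char Char :=
  PySem.Dict.ofList [('h', '1'), ('d', '2'), ('c', '3'), ('s', '4')]

-- ''.join(m.get(ch, ch) for ch in card): joining single-character strings is exactly the
-- string of the mapped characters, ported as String.ofList of the mapped char list.
def format_suits_alt (hand : List String) : List String :=
  hand.map (fun card => String.ofList (card.toList.map (fun ch => pvSuitDict.getD ch ch)))

-- ===== PRECONDITION & SPEC =====
def Spec_format_suits (hand : List String) (out : List String) : Prop := out = format_suits_alt hand
instance (hand : List String) (out : List String) : Decidable (Spec_format_suits hand out) := by unfold Spec_format_suits; infer_instance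

-- ===== CLAIM (what is proved, stated in full; the proofs are below) =====
def Claim_equal_format_suits : Prop := ∀ (hand : List String), Dom_format_suits hand → Spec_format_suits hand (format_suits hand)

-- ===== LEMMAS AND PROOFS =====

-- Chars.replace with a single-character pattern and replacement is a pointwise map.
lemma replace_go_single (o n : Char) : ∀ (l : List Char) (fuel : Nat) (acc : List Char),
    l.length ≤ fuel →
    PySem.Chars.replace.go [o] [n] fuel l acc
      = acc.reverse ++ l.map (fun c => if c = o then n else c) := by
  intro l
  induction l with
  | nil =>
    intro fuel acc _
    cases fuel <;> simp [PySem.Chars.replace.go]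
  | cons c t ih =>
    intro fuel acc h
    cases fuel with
    | zero => simp at h
    | succ fuel =>
      rw [PySem.Chars.replace.go]
      by_cases hc : o = c
      · subst hc
        simp [List.isPrefixOf, ih _ _ (by simpa using h)]
      · simp [List.isPrefixOf, hc, ih _ _ (by simpa using h), Ne.symm hc]

lemma replace_single (o n : Char) (s : List Char) :
    PySem.Chars.replace s [o] [n] = s.map (fun c => if c = o then n else c) := by
  rw [PySem.Chars.replace]
  simpa using replace_go_single o n s s.length [] le_rfl

lemma pvSuitDict_insert_form : pvSuitDict
    = (((PySem.Dict.empty.insert 'h' '1').insert 'd' '2').insert 'c' '3').insert 's' '4' := by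
  decide

-- the four chained single-character substitutions agree with the dict lookup on every character
lemma suit_char (c : Char) :
    (if (if (if (if c = 'h' then '1' else c) = 'd' then '2'
              else if c = 'h' then '1' else c) = 'c' then '3'
            else if (if c = 'h' then '1' else c) = 'd' then '2'
              else if c = 'h' then '1' else c) = 's' then '4'
          else if (if (if c = 'h' then '1' else c) = 'd' then '2'
              else if c = 'h' then '1' else c) = 'c' then '3'
            else if (if c = 'h' then '1' else c) = 'd' then '2'
              else if c = 'h' then '1' else c)
      = pvSuitDict.getD c c := by
  by_cases h1 : c = 'h'
  · subst h1; decide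
  · by_cases h2 : c = 'd'
    · subst h2; decide
    · by_cases h3 : c = 'c'
      · subst h3; decide
      · by_cases h4 : c = 's'
        · subst h4; decide
        · rw [pvSuitDict_insert_form, PySem.Dict.getD_insert_of_ne (hne := h4),
            PySem.Dict.getD_insert_of_ne (hne := h3), PySem.Dict.getD_insert_of_ne (hne := h2),
            PySem.Dict.getD_insert_of_ne (hne := h1)]
          simp [h1, h2, h3, h4, PySem.Dict.getD, PySem.Dict.get?, PySem.Dict.empty]

lemma card_eq (card : String) :
    PySem.Str.replace
      (PySem.Str.replace
        (PySem.Str.replace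
          (PySem.Str.replace card "h" "1") "d" "2") "c" "3") "s" "4"
      = String.ofList (card.toList.map (fun ch => pvSuitDict.getD ch ch)) := by
  apply String.toList_inj.mp
  simp only [PySem.Str.toList_replace, String.toList_ofList]
  have hh : ("h" : String).toList = ['h'] := by decide
  have hd : ("d" : String).toList = ['d'] := by decide
  have hc : ("c" : String).toList = ['c'] := by decide
  have hs : ("s" : String).toList = ['s'] := by decide
  have h1 : ("1" : String).toList = ['1'] := by decide
  have h2 : ("2" : String).toList = ['2'] := by decide
  have h3 : ("3" : String).toList = ['3'] := by decide
  have h4 : ("4" : String).toList = ['4'] := by decide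
  rw [hh, hd, hc, hs, h1, h2, h3, h4]
  rw [replace_single, replace_single, replace_single, replace_single]
  simp only [List.map_map]
  exact List.map_congr_left (fun c _ => suit_char c)

-- ===== VERDICT (by name: the statement is the Claim_ definition above) =====
theorem format_suits_spec : Claim_equal_format_suits := by
  intro hand _
  unfold Spec_format_suits format_suits format_suits_alt
  exact List.map_congr_left (fun card _ => card_eq card)
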